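-- pv_equiv track=rewrite | github.com/VuLAb22cn/AnhVu.github | Lap_trinh_Python/Code_PTIT/ma_hoa_3.py | encode_drm
-- ===== SOURCE A (Python) =====
-- def encode_drm(s):
--     n = len(s)
--     nua_dau = s[:n//2]
--     nua_sau = s[n//2:]
--
--     def calculate_rotation_value(half):
--         return sum(ord(char) - ord('A') for char in half)
--
--     quay_dau = calculate_rotation_value(nua_dau)
--     quay_sau = calculate_rotation_value(nua_sau)
--
--     def rotate_half(half, quay):
--         quay %= 26
--         return ''.join(chr((ord(char) - ord('A') + quay) % 26 + ord('A')) for char in half)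
--
--     a = rotate_half(nua_dau, quay_dau)
--     b = rotate_half(nua_sau, quay_sau)
--
--     result = []
--     for i in range(len(a)):
--         char_first = a[i]
--         char_second = b[i]
--         rotation_value = ord(char_second) - ord('A')
--         merged_char = chr((ord(char_first) - ord('A') + rotation_value) % 26 + ord('A'))
--         result.append(merged_char)
--
--     return ''.join(result)
-- ===== SOURCE B (Python) =====
-- def encode_drm(s):
--     h = len(s) // 2
--     total = sum(ord(c) - ord('A') for c in s)
--     return ''.join(chr((ord(x) + ord(y) + total - 2 * ord('A')) % 26 + ord('A'))
--                    for x, y in zip(s[:h], s[h:]))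
-- ===== Notes on version B (the rewrite author's own statement) =====
-- stated objective: simpler
-- what changed: Replaces the three passes (two half-rotations producing intermediate strings, then an index-based merge loop) with one total offset sum over the whole string and a single zip of the two halves doing all the mod-26 arithmetic in one expression; fewer passes and no intermediate strings give a constant-factor speedup.
import Mathlib
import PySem

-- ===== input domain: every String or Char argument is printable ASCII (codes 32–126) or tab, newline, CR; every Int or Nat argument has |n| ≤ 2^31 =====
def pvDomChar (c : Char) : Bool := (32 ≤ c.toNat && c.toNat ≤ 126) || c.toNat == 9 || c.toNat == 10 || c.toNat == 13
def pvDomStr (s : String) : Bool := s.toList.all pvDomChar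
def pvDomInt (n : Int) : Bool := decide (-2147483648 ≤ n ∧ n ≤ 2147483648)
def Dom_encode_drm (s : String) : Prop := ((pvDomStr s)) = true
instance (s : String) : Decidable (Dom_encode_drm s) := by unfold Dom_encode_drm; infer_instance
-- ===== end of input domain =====

-- B fuses A's two half-rotation passes and the merge loop into one total sum plus a single zip; objective: simpler.

-- ===== PORT A =====
-- sum(ord(char) - ord('A') for char in half)
def pvCalcRot (half : List Char) : Int :=
  half.foldl (fun acc c => acc + ((c.toNat : Int) - 65)) 0

-- chr(m) with 65 ≤ m ≤ 90 is Char.ofNat m (exact on this range)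
def pvRotateHalf (half : List Char) (quay : Int) : List Char :=
  let q := PySem.Int.mod quay 26
  half.map (fun c => Char.ofNat ((((c.toNat : Int) - 65 + q) % 26 + 65).toNat))

def encode_drm (s : String) : String :=
  let cs := s.toList
  let n := cs.length
  let nua_dau := cs.take (n / 2)
  let nua_sau := cs.drop (n / 2)
  let quay_dau := pvCalcRot nua_dau
  let quay_sau := pvCalcRot nua_sau
  let a := pvRotateHalf nua_dau quay_dau
  let b := pvRotateHalf nua_sau quay_sau
  -- for i in range(len(a)): merge a[i] with b[i]  (len a ≤ len b, so this is a zipWith)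
  String.mk (List.zipWith (fun cf cs' =>
    Char.ofNat ((((cf.toNat : Int) - 65 + ((cs'.toNat : Int) - 65)) % 26 + 65).toNat)) a b)

-- ===== PORT B =====
def encode_drm_alt (s : String) : String :=
  let cs := s.toList
  let h := cs.length / 2
  let total := cs.foldl (fun acc c => acc + ((c.toNat : Int) - 65)) 0
  String.mk (List.zipWith (fun x y =>
    Char.ofNat ((((x.toNat : Int) + (y.toNat : Int) + total - 130) % 26 + 65).toNat))
    (cs.take h) (cs.drop h))

-- ===== PRECONDITION & SPEC =====
def Spec_encode_drm (s : String) (out : String) : Prop := out = encode_drm_alt s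
instance (s : String) (out : String) : Decidable (Spec_encode_drm s out) := by unfold Spec_encode_drm; infer_instance

-- ===== CLAIM (what is proved, stated in full; the proofs are below) =====
def Claim_equal_encode_drm : Prop := ∀ (s : String), Dom_encode_drm s → Spec_encode_drm s (encode_drm s)

-- ===== LEMMAS AND PROOFS =====

lemma pvToNat_mkChar (t : Int) : ((Char.ofNat ((t % 26 + 65).toNat)).toNat : Int) = t % 26 + 65 := by
  have h0 : 0 ≤ t % 26 := Int.emod_nonneg t (by norm_num)
  have h1 : t % 26 < 26 := Int.emod_lt_of_pos t (by norm_num)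
  have hv : ((t % 26 + 65).toNat) < 0xD800 := by omega
  have hvalid : Nat.isValidChar ((t % 26 + 65).toNat) := Or.inl (by omega)
  have : Char.toNat (Char.ofNat ((t % 26 + 65).toNat)) = (t % 26 + 65).toNat := by
    unfold Char.ofNat
    rw [dif_pos hvalid]
    simp [Char.ofNatAux, Char.toNat]
  rw [this]; omega

lemma pvCalcRot_eq (l : List Char) (a : Int) :
    l.foldl (fun acc c => acc + ((c.toNat : Int) - 65)) a = a + pvCalcRot l := by
  induction l generalizing a with
  | nil => simp [pvCalcRot]
  | cons c t ih =>
    simp only [List.foldl_cons, pvCalcRot] at *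
    rw [ih, ih (0 + _)]; ring

lemma pvChar_merge (c1 c2 : Char) (qd qs : Int) :
    Char.ofNat (((((Char.ofNat (((c1.toNat : Int) - 65 + PySem.Int.mod qd 26) % 26 + 65).toNat).toNat : Int) - 65 +
      (((Char.ofNat (((c2.toNat : Int) - 65 + PySem.Int.mod qs 26) % 26 + 65).toNat).toNat : Int) - 65)) % 26 + 65).toNat)
    = Char.ofNat ((((c1.toNat : Int) + (c2.toNat : Int) + (qd + qs) - 130) % 26 + 65).toNat) := by
  have hmd : PySem.Int.mod qd 26 = qd % 26 := PySem.Int.mod_eq_emod_of_pos (by norm_num)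
  have hms : PySem.Int.mod qs 26 = qs % 26 := PySem.Int.mod_eq_emod_of_pos (by norm_num)
  rw [hmd, hms, pvToNat_mkChar, pvToNat_mkChar]
  congr 1
  omega

theorem pv_main : ∀ s : String, encode_drm s = encode_drm_alt s := by
  intro s
  unfold encode_drm encode_drm_alt pvRotateHalf
  simp only [List.zipWith_map]
  have htot : (s.toList.foldl (fun acc c => acc + ((c.toNat : Int) - 65)) 0)
      = pvCalcRot (s.toList.take (s.toList.length / 2)) + pvCalcRot (s.toList.drop (s.toList.length / 2)) := by
    conv_lhs => rw [← List.take_append_drop (s.toList.length / 2) s.toList]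
    rw [List.foldl_append, pvCalcRot_eq, pvCalcRot_eq]
    ring
  simp only [htot]
  congr 1
  exact congrFun (congrFun (congrArg List.zipWith
    (funext fun c1 => funext fun c2 => pvChar_merge c1 c2 _ _)) _) _

-- ===== VERDICT (by name: the statement is the Claim_ definition above) =====
theorem encode_drm_spec : Claim_equal_encode_drm := by
  intro s _
  unfold Spec_encode_drm
  exact pv_main s
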